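-- pv_equiv track=rewrite | github.com/Dikshajadhav7/barclyes-frontend | backend/normalize.py | normalize_log
-- ===== SOURCE A (Python) =====
-- COMMON_FIELDS = [
--     "timestamp",
--     "user",
--     "host",
--     "event_type",
--     "source_ip",
--     "destination_ip",
--     "process_name",
--     "status"
-- ]
--
-- def map_event_type(log):
--     if log.get("result") == "fail":
--         return "login_failure"
--     if log.get("result") == "success":
--         return "login_success"
--     if log.get("action") == "process_execution":
--         return "process_execution"
--     return "unknown_event"
--
-- def normalize_log(log):
--     normalized = {field: None for field in COMMON_FIELDS}
--
--     normalized["timestamp"] = log.get("timestamp") or log.get("time")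
--     normalized["user"] = log.get("user") or log.get("usr")
--     normalized["host"] = log.get("host") or log.get("machine")
--     normalized["source_ip"] = log.get("source_ip") or log.get("ip_addr")
--     normalized["destination_ip"] = log.get("destination_ip")
--     normalized["process_name"] = log.get("process_name") or log.get("process")
--     normalized["status"] = log.get("result") or log.get("status")
--     normalized["event_type"] = map_event_type(log)
--
--     return normalized
-- ===== SOURCE B (Python) =====
-- COMMON_FIELDS = [
--     "timestamp",
--     "user",
--     "host",
--     "event_type",
--     "source_ip",
--     "destination_ip",
--     "process_name",
--     "status"
-- ]
--
-- # Inverted index: raw log key -> the normalized field it feeds.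
-- # PRIMARY_KEY holds the preferred key of each field, FALLBACK_KEY the
-- # last-resort key (whose value is taken as-is when the primary is falsy).
-- PRIMARY_KEY = {
--     "timestamp": "timestamp",
--     "user": "user",
--     "host": "host",
--     "source_ip": "source_ip",
--     "process_name": "process_name",
--     "result": "status",
-- }
-- FALLBACK_KEY = {
--     "time": "timestamp",
--     "usr": "user",
--     "machine": "host",
--     "ip_addr": "source_ip",
--     "destination_ip": "destination_ip",
--     "process": "process_name",
--     "status": "status",
-- }
--
-- def map_event_type(log):
--     if log.get("result") == "fail":
--         return "login_failure"
--     if log.get("result") == "success":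
--         return "login_success"
--     if log.get("action") == "process_execution":
--         return "process_execution"
--     return "unknown_event"
--
-- def normalize_log(log):
--     # One pass over the log, dispatching each entry to the field it feeds.
--     prim, fall = {}, {}
--     for k, v in log.items():
--         if k in PRIMARY_KEY:
--             prim[PRIMARY_KEY[k]] = v
--         elif k in FALLBACK_KEY:
--             fall[FALLBACK_KEY[k]] = v
--     out = {}
--     for f in COMMON_FIELDS:
--         if f == "event_type":
--             out[f] = map_event_type(log)
--         else:
--             v = prim.get(f)
--             out[f] = v if v else fall.get(f)
--     return out
-- ===== Notes on version B (the rewrite author's own statement) =====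
-- stated objective: alternative
-- what changed: B replaces A's seven per-field `get(k1) or get(k2)` lookup chains by a single pass over the log that dispatches each entry through an inverted key-to-field index into a primary and a fallback table, then assembles the output fields from those two tables.
import Mathlib
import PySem

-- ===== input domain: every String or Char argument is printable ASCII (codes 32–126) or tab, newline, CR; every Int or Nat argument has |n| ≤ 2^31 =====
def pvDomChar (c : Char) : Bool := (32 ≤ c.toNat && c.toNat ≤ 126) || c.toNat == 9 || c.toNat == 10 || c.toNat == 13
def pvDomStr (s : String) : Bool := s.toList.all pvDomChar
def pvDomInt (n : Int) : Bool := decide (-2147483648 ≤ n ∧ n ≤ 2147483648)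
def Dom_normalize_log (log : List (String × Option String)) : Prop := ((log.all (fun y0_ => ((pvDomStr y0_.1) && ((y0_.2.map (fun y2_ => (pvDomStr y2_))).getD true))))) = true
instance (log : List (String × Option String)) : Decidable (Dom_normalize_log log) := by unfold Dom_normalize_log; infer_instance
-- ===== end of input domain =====

-- B inverts A's per-field lookup chains into a single pass over the log that dispatches each
-- entry to the field it feeds (objective: alternative; same cost, different traversal).

-- ===== PORT A =====
-- log.get(k): first match in the association list; missing key and stored None both give none
def pyGetKey (log : List (String × Option String)) (k : String) : Option String :=
  ((PySem.Dict.mk log).get? k).join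

-- Python `a or b` on these values: a if truthy (a nonempty string), else b
def pyOr (a b : Option String) : Option String :=
  match a with
  | some s => if s = "" then b else some s
  | none => b

def COMMON_FIELDS : List String :=
  ["timestamp", "user", "host", "event_type", "source_ip", "destination_ip", "process_name", "status"]

def map_event_type_port (log : List (String × Option String)) : String :=
  if pyGetKey log "result" = some "fail" then "login_failure"
  else if pyGetKey log "result" = some "success" then "login_success"
  else if pyGetKey log "action" = some "process_execution" then "process_execution"
  else "unknown_event"

def normalize_log (log : List (String × Option String)) : List (String × Option String) :=
  let normalized := PySem.Dict.mk (COMMON_FIELDS.map (fun f => (f, (none : Option String))))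
  let normalized := normalized.insert "timestamp" (pyOr (pyGetKey log "timestamp") (pyGetKey log "time"))
  let normalized := normalized.insert "user" (pyOr (pyGetKey log "user") (pyGetKey log "usr"))
  let normalized := normalized.insert "host" (pyOr (pyGetKey log "host") (pyGetKey log "machine"))
  let normalized := normalized.insert "source_ip" (pyOr (pyGetKey log "source_ip") (pyGetKey log "ip_addr"))
  let normalized := normalized.insert "destination_ip" (pyGetKey log "destination_ip")
  let normalized := normalized.insert "process_name" (pyOr (pyGetKey log "process_name") (pyGetKey log "process"))
  let normalized := normalized.insert "status" (pyOr (pyGetKey log "result") (pyGetKey log "status"))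
  let normalized := normalized.insert "event_type" (some (map_event_type_port log))
  normalized.items

-- ===== PORT B =====
-- inverted index: raw log key → the normalized field it feeds
def PRIMARY_KEY : PySem.Dict String String :=
  PySem.Dict.mk [("timestamp", "timestamp"), ("user", "user"), ("host", "host"),
                 ("source_ip", "source_ip"), ("process_name", "process_name"), ("result", "status")]

def FALLBACK_KEY : PySem.Dict String String :=
  PySem.Dict.mk [("time", "timestamp"), ("usr", "user"), ("machine", "host"),
                 ("ip_addr", "source_ip"), ("destination_ip", "destination_ip"),
                 ("process", "process_name"), ("status", "status")]

def pyTruthy : Option String → Bool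
  | some s => s ≠ ""
  | none => false

-- the loop body: `if k in PRIMARY_KEY: prim[...] = v  elif k in FALLBACK_KEY: fall[...] = v`
def collectStep (pf : PySem.Dict String (Option String) × PySem.Dict String (Option String))
    (kv : String × Option String) :
    PySem.Dict String (Option String) × PySem.Dict String (Option String) :=
  match PRIMARY_KEY.get? kv.1 with
  | some f => (pf.1.insert f kv.2, pf.2)
  | none =>
    match FALLBACK_KEY.get? kv.1 with
    | some f => (pf.1, pf.2.insert f kv.2)
    | none => pf

def normalize_log_alt (log : List (String × Option String)) : List (String × Option String) :=
  let pf := log.foldl collectStep (PySem.Dict.empty, PySem.Dict.empty)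
  (COMMON_FIELDS.foldl (fun out f =>
      if f = "event_type" then out.insert f (some (map_event_type_port log))
      else
        let v := (pf.1.get? f).join
        out.insert f (if pyTruthy v then v else (pf.2.get? f).join))
    PySem.Dict.empty).items

-- ===== PRECONDITION & SPEC =====
-- Pre_ restricts to association lists with pairwise-distinct keys: the faithful images of a
-- Python dict (A's argument is a dict, which cannot hold a duplicate key), so nothing A
-- accepts is excluded.
def Pre_normalize_log (log : List (String × Option String)) : Prop :=
  (log.map Prod.fst).Nodup
instance (log : List (String × Option String)) : Decidable (Pre_normalize_log log) := by
  unfold Pre_normalize_log; infer_instance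

def pvWitness_normalize_log : (List (String × Option String)) :=
  [("time", some "10:00"), ("usr", some "bob"), ("result", some "fail"), ("note", none)]

def Spec_normalize_log (log : List (String × Option String)) (out : List (String × Option String)) : Prop := out = normalize_log_alt log
instance (log : List (String × Option String)) (out : List (String × Option String)) : Decidable (Spec_normalize_log log out) := by unfold Spec_normalize_log; infer_instance

-- ===== CLAIM (what is proved, stated in full; the proofs are below) =====
def Claim_equal_normalize_log : Prop := ∀ (log : List (String × Option String)), Dom_normalize_log log → Pre_normalize_log log → Spec_normalize_log log (normalize_log log)

-- ===== LEMMAS AND PROOFS =====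

-- every hit of the primary table: (key, field) is one of the six pairs
theorem prim_cases (k g : String) (h : PRIMARY_KEY.get? k = some g) :
    (k = "timestamp" ∧ g = "timestamp") ∨ (k = "user" ∧ g = "user") ∨ (k = "host" ∧ g = "host") ∨
    (k = "source_ip" ∧ g = "source_ip") ∨ (k = "process_name" ∧ g = "process_name") ∨
    (k = "result" ∧ g = "status") := by
  simp only [PRIMARY_KEY, PySem.Dict.get?_mk_cons] at h
  split_ifs at h with h1 h2 h3 h4 h5 h6
  · exact Or.inl ⟨(eq_of_beq h1).symm, (Option.some.inj h).symm⟩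
  · exact Or.inr (Or.inl ⟨(eq_of_beq h2).symm, (Option.some.inj h).symm⟩)
  · exact Or.inr (Or.inr (Or.inl ⟨(eq_of_beq h3).symm, (Option.some.inj h).symm⟩))
  · exact Or.inr (Or.inr (Or.inr (Or.inl ⟨(eq_of_beq h4).symm, (Option.some.inj h).symm⟩)))
  · exact Or.inr (Or.inr (Or.inr (Or.inr (Or.inl ⟨(eq_of_beq h5).symm, (Option.some.inj h).symm⟩))))
  · exact Or.inr (Or.inr (Or.inr (Or.inr (Or.inr ⟨(eq_of_beq h6).symm, (Option.some.inj h).symm⟩))))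
  · exact absurd h (by simp [PySem.Dict.get?])

-- every hit of the fallback table: (key, field) is one of the seven pairs
theorem fall_cases (k g : String) (h : FALLBACK_KEY.get? k = some g) :
    (k = "time" ∧ g = "timestamp") ∨ (k = "usr" ∧ g = "user") ∨ (k = "machine" ∧ g = "host") ∨
    (k = "ip_addr" ∧ g = "source_ip") ∨ (k = "destination_ip" ∧ g = "destination_ip") ∨
    (k = "process" ∧ g = "process_name") ∨ (k = "status" ∧ g = "status") := by
  simp only [FALLBACK_KEY, PySem.Dict.get?_mk_cons] at h
  split_ifs at h with h1 h2 h3 h4 h5 h6 h7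
  · exact Or.inl ⟨(eq_of_beq h1).symm, (Option.some.inj h).symm⟩
  · exact Or.inr (Or.inl ⟨(eq_of_beq h2).symm, (Option.some.inj h).symm⟩)
  · exact Or.inr (Or.inr (Or.inl ⟨(eq_of_beq h3).symm, (Option.some.inj h).symm⟩))
  · exact Or.inr (Or.inr (Or.inr (Or.inl ⟨(eq_of_beq h4).symm, (Option.some.inj h).symm⟩)))
  · exact Or.inr (Or.inr (Or.inr (Or.inr (Or.inl ⟨(eq_of_beq h5).symm, (Option.some.inj h).symm⟩))))
  · exact Or.inr (Or.inr (Or.inr (Or.inr (Or.inr (Or.inl ⟨(eq_of_beq h6).symm, (Option.some.inj h).symm⟩)))))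
  · exact Or.inr (Or.inr (Or.inr (Or.inr (Or.inr (Or.inr ⟨(eq_of_beq h7).symm, (Option.some.inj h).symm⟩)))))
  · exact absurd h (by simp [PySem.Dict.get?])

-- if no entry of l feeds prim[f], the first component's binding at f is untouched
theorem no_hit_fst (l : List (String × Option String))
    (pf : PySem.Dict String (Option String) × PySem.Dict String (Option String)) (f : String)
    (h : ∀ p ∈ l, ∀ g, PRIMARY_KEY.get? p.1 = some g → g ≠ f) :
    ((l.foldl collectStep pf).1).get? f = pf.1.get? f := by
  induction l generalizing pf with
  | nil => rfl
  | cons p rest ih =>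
    have htail : ∀ q ∈ rest, ∀ g, PRIMARY_KEY.get? q.1 = some g → g ≠ f :=
      fun q hq => h q (List.mem_cons_of_mem _ hq)
    simp only [List.foldl]
    rcases h1 : PRIMARY_KEY.get? p.1 with _ | f0
    · rcases h2 : FALLBACK_KEY.get? p.1 with _ | g0
      · rw [show collectStep pf p = pf by simp [collectStep, h1, h2]]
        exact ih pf htail
      · rw [show collectStep pf p = (pf.1, pf.2.insert g0 p.2) by simp [collectStep, h1, h2]]
        exact ih _ htail
    · rw [show collectStep pf p = (pf.1.insert f0 p.2, pf.2) by simp [collectStep, h1]]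
      rw [ih _ htail]
      exact PySem.Dict.get?_insert_of_ne _ _ (Ne.symm (h p List.mem_cons_self f0 h1))

-- if no entry of l feeds fall[f], the second component's binding at f is untouched
theorem no_hit_snd (l : List (String × Option String))
    (pf : PySem.Dict String (Option String) × PySem.Dict String (Option String)) (f : String)
    (h : ∀ p ∈ l, ∀ g, FALLBACK_KEY.get? p.1 = some g → g ≠ f) :
    ((l.foldl collectStep pf).2).get? f = pf.2.get? f := by
  induction l generalizing pf with
  | nil => rfl
  | cons p rest ih =>
    have htail : ∀ q ∈ rest, ∀ g, FALLBACK_KEY.get? q.1 = some g → g ≠ f :=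
      fun q hq => h q (List.mem_cons_of_mem _ hq)
    simp only [List.foldl]
    rcases h1 : PRIMARY_KEY.get? p.1 with _ | f0
    · rcases h2 : FALLBACK_KEY.get? p.1 with _ | g0
      · rw [show collectStep pf p = pf by simp [collectStep, h1, h2]]
        exact ih pf htail
      · rw [show collectStep pf p = (pf.1, pf.2.insert g0 p.2) by simp [collectStep, h1, h2]]
        rw [ih _ htail]
        exact PySem.Dict.get?_insert_of_ne _ _ (Ne.symm (h p List.mem_cons_self g0 h2))
    · rw [show collectStep pf p = (pf.1.insert f0 p.2, pf.2) by simp [collectStep, h1]]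
      exact ih _ htail

-- the first component's binding at f is log.get(k), for k the unique primary key of f
theorem hit_fst (l : List (String × Option String))
    (pf : PySem.Dict String (Option String) × PySem.Dict String (Option String)) (f k : String)
    (hk : PRIMARY_KEY.get? k = some f)
    (hinj : ∀ k' g, PRIMARY_KEY.get? k' = some g → g = f → k' = k)
    (hnd : (l.map Prod.fst).Nodup) :
    ((l.foldl collectStep pf).1).get? f = Option.or ((PySem.Dict.mk l).get? k) (pf.1.get? f) := by
  induction l generalizing pf with
  | nil => simp [PySem.Dict.get?]
  | cons p rest ih =>
    obtain ⟨k0, v0⟩ := p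
    simp only [List.map, List.nodup_cons] at hnd
    simp only [List.foldl, PySem.Dict.get?_mk_cons]
    by_cases hpk : k0 = k
    · subst hpk
      rw [show collectStep pf (k0, v0) = (pf.1.insert f v0, pf.2) by simp [collectStep, hk]]
      have hrest : ((rest.foldl collectStep (pf.1.insert f v0, pf.2)).1).get? f
          = (pf.1.insert f v0).get? f := by
        refine no_hit_fst rest _ f (fun q hq g hg hgf => ?_)
        exact hnd.1 ((hinj q.1 g hg hgf) ▸ List.mem_map_of_mem hq)
      rw [hrest, PySem.Dict.get?_insert_self]
      simp
    · have hne : (k0 == k) = false := beq_eq_false_iff_ne.mpr hpk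
      rw [hne]
      simp only [Bool.false_eq_true, if_false]
      rcases h1 : PRIMARY_KEY.get? k0 with _ | f0
      · rcases h2 : FALLBACK_KEY.get? k0 with _ | g0
        · rw [show collectStep pf (k0, v0) = pf by simp [collectStep, h1, h2]]
          exact ih pf hnd.2
        · rw [show collectStep pf (k0, v0) = (pf.1, pf.2.insert g0 v0) by simp [collectStep, h1, h2]]
          exact ih _ hnd.2
      · have hf0 : f0 ≠ f := fun hf => hpk (hinj k0 f0 h1 hf)
        rw [show collectStep pf (k0, v0) = (pf.1.insert f0 v0, pf.2) by simp [collectStep, h1]]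
        rw [ih _ hnd.2, PySem.Dict.get?_insert_of_ne _ _ (Ne.symm hf0)]

-- the second component's binding at f is log.get(k), for k the unique fallback key of f
theorem hit_snd (l : List (String × Option String))
    (pf : PySem.Dict String (Option String) × PySem.Dict String (Option String)) (f k : String)
    (hk : FALLBACK_KEY.get? k = some f)
    (hkp : PRIMARY_KEY.get? k = none)
    (hinj : ∀ k' g, FALLBACK_KEY.get? k' = some g → g = f → k' = k)
    (hnd : (l.map Prod.fst).Nodup) :
    ((l.foldl collectStep pf).2).get? f = Option.or ((PySem.Dict.mk l).get? k) (pf.2.get? f) := by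
  induction l generalizing pf with
  | nil => simp [PySem.Dict.get?]
  | cons p rest ih =>
    obtain ⟨k0, v0⟩ := p
    simp only [List.map, List.nodup_cons] at hnd
    simp only [List.foldl, PySem.Dict.get?_mk_cons]
    by_cases hpk : k0 = k
    · subst hpk
      rw [show collectStep pf (k0, v0) = (pf.1, pf.2.insert f v0) by simp [collectStep, hkp, hk]]
      have hrest : ((rest.foldl collectStep (pf.1, pf.2.insert f v0)).2).get? f
          = (pf.2.insert f v0).get? f := by
        refine no_hit_snd rest _ f (fun q hq g hg hgf => ?_)
        exact hnd.1 ((hinj q.1 g hg hgf) ▸ List.mem_map_of_mem hq)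
      rw [hrest, PySem.Dict.get?_insert_self]
      simp
    · have hne : (k0 == k) = false := beq_eq_false_iff_ne.mpr hpk
      rw [hne]
      simp only [Bool.false_eq_true, if_false]
      rcases h1 : PRIMARY_KEY.get? k0 with _ | f0
      · rcases h2 : FALLBACK_KEY.get? k0 with _ | g0
        · rw [show collectStep pf (k0, v0) = pf by simp [collectStep, h1, h2]]
          exact ih pf hnd.2
        · have hg0 : g0 ≠ f := fun hf => hpk (hinj k0 g0 h2 hf)
          rw [show collectStep pf (k0, v0) = (pf.1, pf.2.insert g0 v0) by simp [collectStep, h1, h2]]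
          rw [ih _ hnd.2, PySem.Dict.get?_insert_of_ne _ _ (Ne.symm hg0)]
      · rw [show collectStep pf (k0, v0) = (pf.1.insert f0 v0, pf.2) by simp [collectStep, h1]]
        exact ih _ hnd.2

theorem pyOr_eq (a b : Option String) : pyOr a b = if pyTruthy a then a else b := by
  cases a with
  | none => simp [pyOr, pyTruthy]
  | some s => by_cases hs : s = "" <;> simp [pyOr, pyTruthy, hs]

theorem prim_inj_timestamp : ∀ k' g, PRIMARY_KEY.get? k' = some g → g = "timestamp" → k' = "timestamp" := by
  intro k' g h hg
  rcases prim_cases k' g h with ⟨rfl, rfl⟩|⟨rfl, rfl⟩|⟨rfl, rfl⟩|⟨rfl, rfl⟩|⟨rfl, rfl⟩|⟨rfl, rfl⟩ <;>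
    first | rfl | exact absurd hg (by decide)

theorem prim_inj_user : ∀ k' g, PRIMARY_KEY.get? k' = some g → g = "user" → k' = "user" := by
  intro k' g h hg
  rcases prim_cases k' g h with ⟨rfl, rfl⟩|⟨rfl, rfl⟩|⟨rfl, rfl⟩|⟨rfl, rfl⟩|⟨rfl, rfl⟩|⟨rfl, rfl⟩ <;>
    first | rfl | exact absurd hg (by decide)

theorem prim_inj_host : ∀ k' g, PRIMARY_KEY.get? k' = some g → g = "host" → k' = "host" := by
  intro k' g h hg
  rcases prim_cases k' g h with ⟨rfl, rfl⟩|⟨rfl, rfl⟩|⟨rfl, rfl⟩|⟨rfl, rfl⟩|⟨rfl, rfl⟩|⟨rfl, rfl⟩ <;>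
    first | rfl | exact absurd hg (by decide)

theorem prim_inj_source_ip : ∀ k' g, PRIMARY_KEY.get? k' = some g → g = "source_ip" → k' = "source_ip" := by
  intro k' g h hg
  rcases prim_cases k' g h with ⟨rfl, rfl⟩|⟨rfl, rfl⟩|⟨rfl, rfl⟩|⟨rfl, rfl⟩|⟨rfl, rfl⟩|⟨rfl, rfl⟩ <;>
    first | rfl | exact absurd hg (by decide)

theorem prim_inj_process_name : ∀ k' g, PRIMARY_KEY.get? k' = some g → g = "process_name" → k' = "process_name" := by
  intro k' g h hg
  rcases prim_cases k' g h with ⟨rfl, rfl⟩|⟨rfl, rfl⟩|⟨rfl, rfl⟩|⟨rfl, rfl⟩|⟨rfl, rfl⟩|⟨rfl, rfl⟩ <;>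
    first | rfl | exact absurd hg (by decide)

theorem prim_inj_status : ∀ k' g, PRIMARY_KEY.get? k' = some g → g = "status" → k' = "result" := by
  intro k' g h hg
  rcases prim_cases k' g h with ⟨rfl, rfl⟩|⟨rfl, rfl⟩|⟨rfl, rfl⟩|⟨rfl, rfl⟩|⟨rfl, rfl⟩|⟨rfl, rfl⟩ <;>
    first | rfl | exact absurd hg (by decide)

theorem fall_inj_timestamp : ∀ k' g, FALLBACK_KEY.get? k' = some g → g = "timestamp" → k' = "time" := by
  intro k' g h hg
  rcases fall_cases k' g h with ⟨rfl, rfl⟩|⟨rfl, rfl⟩|⟨rfl, rfl⟩|⟨rfl, rfl⟩|⟨rfl, rfl⟩|⟨rfl, rfl⟩|⟨rfl, rfl⟩ <;>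
    first | rfl | exact absurd hg (by decide)

theorem fall_inj_user : ∀ k' g, FALLBACK_KEY.get? k' = some g → g = "user" → k' = "usr" := by
  intro k' g h hg
  rcases fall_cases k' g h with ⟨rfl, rfl⟩|⟨rfl, rfl⟩|⟨rfl, rfl⟩|⟨rfl, rfl⟩|⟨rfl, rfl⟩|⟨rfl, rfl⟩|⟨rfl, rfl⟩ <;>
    first | rfl | exact absurd hg (by decide)

theorem fall_inj_host : ∀ k' g, FALLBACK_KEY.get? k' = some g → g = "host" → k' = "machine" := by
  intro k' g h hg
  rcases fall_cases k' g h with ⟨rfl, rfl⟩|⟨rfl, rfl⟩|⟨rfl, rfl⟩|⟨rfl, rfl⟩|⟨rfl, rfl⟩|⟨rfl, rfl⟩|⟨rfl, rfl⟩ <;>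
    first | rfl | exact absurd hg (by decide)

theorem fall_inj_source_ip : ∀ k' g, FALLBACK_KEY.get? k' = some g → g = "source_ip" → k' = "ip_addr" := by
  intro k' g h hg
  rcases fall_cases k' g h with ⟨rfl, rfl⟩|⟨rfl, rfl⟩|⟨rfl, rfl⟩|⟨rfl, rfl⟩|⟨rfl, rfl⟩|⟨rfl, rfl⟩|⟨rfl, rfl⟩ <;>
    first | rfl | exact absurd hg (by decide)

theorem fall_inj_destination_ip : ∀ k' g, FALLBACK_KEY.get? k' = some g → g = "destination_ip" → k' = "destination_ip" := by
  intro k' g h hg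
  rcases fall_cases k' g h with ⟨rfl, rfl⟩|⟨rfl, rfl⟩|⟨rfl, rfl⟩|⟨rfl, rfl⟩|⟨rfl, rfl⟩|⟨rfl, rfl⟩|⟨rfl, rfl⟩ <;>
    first | rfl | exact absurd hg (by decide)

theorem fall_inj_process_name : ∀ k' g, FALLBACK_KEY.get? k' = some g → g = "process_name" → k' = "process" := by
  intro k' g h hg
  rcases fall_cases k' g h with ⟨rfl, rfl⟩|⟨rfl, rfl⟩|⟨rfl, rfl⟩|⟨rfl, rfl⟩|⟨rfl, rfl⟩|⟨rfl, rfl⟩|⟨rfl, rfl⟩ <;>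
    first | rfl | exact absurd hg (by decide)

theorem fall_inj_status : ∀ k' g, FALLBACK_KEY.get? k' = some g → g = "status" → k' = "status" := by
  intro k' g h hg
  rcases fall_cases k' g h with ⟨rfl, rfl⟩|⟨rfl, rfl⟩|⟨rfl, rfl⟩|⟨rfl, rfl⟩|⟨rfl, rfl⟩|⟨rfl, rfl⟩|⟨rfl, rfl⟩ <;>
    first | rfl | exact absurd hg (by decide)

theorem prim_no_destination_ip : ∀ k' g, PRIMARY_KEY.get? k' = some g → g ≠ "destination_ip" := by
  intro k' g h
  rcases prim_cases k' g h with ⟨rfl, rfl⟩|⟨rfl, rfl⟩|⟨rfl, rfl⟩|⟨rfl, rfl⟩|⟨rfl, rfl⟩|⟨rfl, rfl⟩ <;> decide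

-- ===== VERDICT (by name: the statement is the Claim_ definition above) =====
set_option maxHeartbeats 2000000 in
theorem normalize_log_spec : Claim_equal_normalize_log := by
  intro log _ hpre
  show normalize_log log = normalize_log_alt log
  have hp_timestamp := hit_fst log (PySem.Dict.empty, PySem.Dict.empty) "timestamp" "timestamp" (by decide) prim_inj_timestamp hpre
  simp only [PySem.Dict.get?_empty, Option.or_none] at hp_timestamp
  have hp_user := hit_fst log (PySem.Dict.empty, PySem.Dict.empty) "user" "user" (by decide) prim_inj_user hpre
  simp only [PySem.Dict.get?_empty, Option.or_none] at hp_user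
  have hp_host := hit_fst log (PySem.Dict.empty, PySem.Dict.empty) "host" "host" (by decide) prim_inj_host hpre
  simp only [PySem.Dict.get?_empty, Option.or_none] at hp_host
  have hp_source_ip := hit_fst log (PySem.Dict.empty, PySem.Dict.empty) "source_ip" "source_ip" (by decide) prim_inj_source_ip hpre
  simp only [PySem.Dict.get?_empty, Option.or_none] at hp_source_ip
  have hp_process_name := hit_fst log (PySem.Dict.empty, PySem.Dict.empty) "process_name" "process_name" (by decide) prim_inj_process_name hpre
  simp only [PySem.Dict.get?_empty, Option.or_none] at hp_process_name
  have hp_status := hit_fst log (PySem.Dict.empty, PySem.Dict.empty) "status" "result" (by decide) prim_inj_status hpre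
  simp only [PySem.Dict.get?_empty, Option.or_none] at hp_status
  have hp_destination_ip := no_hit_fst log (PySem.Dict.empty, PySem.Dict.empty) "destination_ip"
    (fun p _ g hg => prim_no_destination_ip p.1 g hg)
  simp only [PySem.Dict.get?_empty] at hp_destination_ip
  have hf_timestamp := hit_snd log (PySem.Dict.empty, PySem.Dict.empty) "timestamp" "time" (by decide) (by decide) fall_inj_timestamp hpre
  simp only [PySem.Dict.get?_empty, Option.or_none] at hf_timestamp
  have hf_user := hit_snd log (PySem.Dict.empty, PySem.Dict.empty) "user" "usr" (by decide) (by decide) fall_inj_user hpre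
  simp only [PySem.Dict.get?_empty, Option.or_none] at hf_user
  have hf_host := hit_snd log (PySem.Dict.empty, PySem.Dict.empty) "host" "machine" (by decide) (by decide) fall_inj_host hpre
  simp only [PySem.Dict.get?_empty, Option.or_none] at hf_host
  have hf_source_ip := hit_snd log (PySem.Dict.empty, PySem.Dict.empty) "source_ip" "ip_addr" (by decide) (by decide) fall_inj_source_ip hpre
  simp only [PySem.Dict.get?_empty, Option.or_none] at hf_source_ip
  have hf_destination_ip := hit_snd log (PySem.Dict.empty, PySem.Dict.empty) "destination_ip" "destination_ip" (by decide) (by decide) fall_inj_destination_ip hpre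
  simp only [PySem.Dict.get?_empty, Option.or_none] at hf_destination_ip
  have hf_process_name := hit_snd log (PySem.Dict.empty, PySem.Dict.empty) "process_name" "process" (by decide) (by decide) fall_inj_process_name hpre
  simp only [PySem.Dict.get?_empty, Option.or_none] at hf_process_name
  have hf_status := hit_snd log (PySem.Dict.empty, PySem.Dict.empty) "status" "status" (by decide) (by decide) fall_inj_status hpre
  simp only [PySem.Dict.get?_empty, Option.or_none] at hf_status
  simp only [normalize_log, normalize_log_alt, COMMON_FIELDS, List.map, List.foldl,
    String.reduceEq, reduceIte]
  rw [hp_timestamp, hp_user, hp_host, hp_source_ip, hp_process_name, hp_status,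
      hp_destination_ip, hf_timestamp, hf_user, hf_host, hf_source_ip, hf_destination_ip,
      hf_process_name, hf_status]
  simp only [pyGetKey, Option.join_none]
  simp only [← pyOr_eq]
  simp only [show ∀ b : Option String, pyOr none b = b from fun _ => rfl]
  rfl
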